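-- pv_equiv track=rewrite | github.com/Wpawlina/AGH-DSA-Course | egzaminy/sortowanie/Google/egzP6a.py | google
-- ===== SOURCE A (Python) =====
-- def countingSort(T,k,kol):
--     n=len(T)
--     C=[0]*k
--     B=[None]*n
--     for element in T:
--         C[element[kol]]+=1
--     for i in range(1,k):
--         C[i]+=C[i-1]
--     for i in range(n-1,-1,-1):
--         B[C[T[i][kol]]-1]=T[i]
--         C[T[i][kol]]-=1
--     for i in range(n):
--         T[i]=B[i]
--
-- def countLetter(string):
--
--     res=0
--     for s in string:
--         if 97<=ord(s)<=122:
--             res+=1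
--     return res
--
-- def google ( H, s ):
--     n=len(H)
--     k=len(max(H,key=lambda x: len(x)))+1
--     for i in range(n):
--         H[i]=(H[i],len(H[i]),countLetter(H[i]))
--     countingSort(H,k,2)
--     countingSort(H,k,1)
--     H.reverse()
--     return H[s-1][0].strip()
-- ===== SOURCE B (Python) =====
-- def google(H, s):
--     T = [(x, len(x), sum(1 for ch in x if 'a' <= ch <= 'z')) for x in H]
--     T.sort(key=lambda t: (t[1], t[2]))
--     T.reverse()
--     return T[s - 1][0].strip()
-- ===== Notes on version B (the rewrite author's own statement) =====
-- stated objective: idiomatic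
-- what changed: A's two hand-written stable counting-sort passes over a count array are replaced by one stable library sort on the (length, letter-count) key pair followed by a reverse; B also does not mutate H in place.
import Mathlib
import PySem

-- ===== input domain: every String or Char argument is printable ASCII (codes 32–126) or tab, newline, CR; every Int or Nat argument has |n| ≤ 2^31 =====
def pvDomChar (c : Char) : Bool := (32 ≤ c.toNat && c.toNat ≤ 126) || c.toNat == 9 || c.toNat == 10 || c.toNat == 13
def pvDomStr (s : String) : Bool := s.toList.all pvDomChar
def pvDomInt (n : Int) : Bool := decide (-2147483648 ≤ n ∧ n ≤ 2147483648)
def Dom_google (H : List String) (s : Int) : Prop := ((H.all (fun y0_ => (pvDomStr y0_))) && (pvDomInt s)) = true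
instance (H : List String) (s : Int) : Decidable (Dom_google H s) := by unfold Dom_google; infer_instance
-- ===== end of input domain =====

-- B replaces A's two hand-written counting-sort passes by one stable library sort on the
-- (length, letter-count) key pair followed by a reverse (idiomatic; same return value).
-- A mutates its argument list H in place, B does not: the equivalence proved here is about
-- the RETURN value only.

-- ===== PORT A =====
-- Python tuple indexing element[kol]; countingSort is only called with kol = 1 or 2
def pvGetCol (e : String × Int × Int) (kol : Int) : Int :=
  if kol = 1 then e.2.1 else e.2.2

def pvCountingSort (T : List (String × Int × Int)) (k : Int) (kol : Int) : List (String × Int × Int) :=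
  let d : String × Int × Int := ("", 0, 0)
  let n : Int := PySem.List.len T
  let C0 : List Int := List.replicate k.toNat 0
  -- B = [None]*n: the None placeholder is ported as a dummy tuple; every slot is overwritten before it is read
  let B0 : List (String × Int × Int) := List.replicate n.toNat d
  let C1 := T.foldl (fun C element =>
      PySem.List.pySetD C (pvGetCol element kol) (PySem.List.pyGetD C (pvGetCol element kol) 0 + 1)) C0
  let C2 := (PySem.List.pyRange 1 k 1).foldl (fun C i =>
      PySem.List.pySetD C i (PySem.List.pyGetD C i 0 + PySem.List.pyGetD C (i-1) 0)) C1
  let BC := (PySem.List.pyRange (n-1) (-1) (-1)).foldl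
      (fun (BC : List (String × Int × Int) × List Int) i =>
        let t := PySem.List.pyGetD T i d
        let c := PySem.List.pyGetD BC.2 (pvGetCol t kol) 0
        (PySem.List.pySetD BC.1 (c - 1) t, PySem.List.pySetD BC.2 (pvGetCol t kol) (c - 1))) (B0, C2)
  (PySem.List.pyRange 0 n 1).map (fun i => PySem.List.pyGetD BC.1 i d)

def pvCountLetter (str : String) : Int :=
  str.toList.foldl (fun res s => if 97 ≤ (s.toNat : Int) ∧ (s.toNat : Int) ≤ 122 then res + 1 else res) 0

def google (H : List String) (s : Int) : String :=
  let n : Int := PySem.List.len H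
  -- max(H, key=len) raises ValueError on empty H: excluded by Pre_google
  let k : Int := PySem.Str.len (PySem.List.maxD H (fun x => PySem.Str.len x) "") + 1
  let H1 := (PySem.List.pyRange 0 n 1).map (fun i =>
      let x := PySem.List.pyGetD H i ""
      (x, PySem.Str.len x, pvCountLetter x))
  let H2 := pvCountingSort H1 k 2
  let H3 := pvCountingSort H2 k 1
  let H4 := H3.reverse
  PySem.Str.strip (PySem.List.pyGetD H4 (s-1) ("", 0, 0)).1

-- ===== PORT B =====
def pvLetters (x : String) : Int :=
  (x.toList.countP (fun c => decide ('a' ≤ c ∧ c ≤ 'z')) : Nat)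

def google_alt (H : List String) (s : Int) : String :=
  let T := H.map (fun x => (x, PySem.Str.len x, pvLetters x))
  let T2 := (PySem.List.sorted2 T (fun t => t.2.1) (fun t => t.2.2)).reverse
  PySem.Str.strip (PySem.List.pyGetD T2 (s-1) ("", 0, 0)).1

-- ===== PRECONDITION & SPEC =====
-- Pre_ excludes exactly the inputs where A raises: H = [] (ValueError from max) and an s with
-- s-1 outside Python's index range for H (IndexError on H[s-1]).
def Pre_google (H : List String) (s : Int) : Prop :=
  H ≠ [] ∧ PySem.Raise.InRange H.length (s - 1)
instance (H : List String) (s : Int) : Decidable (Pre_google H s) := by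
  unfold Pre_google; infer_instance

def pvWitness_google : List String × Int := (["ab", " c ", "AB"], 2)

def Spec_google (H : List String) (s : Int) (out : String) : Prop := out = google_alt H s
instance (H : List String) (s : Int) (out : String) : Decidable (Spec_google H s out) := by
  unfold Spec_google; infer_instance

-- ===== CLAIM (what is proved, stated in full; the proofs are below) =====
def Claim_equal_google : Prop := ∀ (H : List String) (s : Int),
  Dom_google H s → Pre_google H s → Spec_google H s (google H s)

-- ===== LEMMAS AND PROOFS =====

theorem pvSet_map_range {β : Type} (m w : Nat) (f : Nat → β) (x : β) :
    ((List.range m).map f).set w x = (List.range m).map (fun v => if v = w then x else f v) := by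
  apply List.ext_getElem (by simp)
  intro i h1 h2
  simp only [List.getElem_set, List.getElem_map, List.getElem_range]
  rcases eq_or_ne i w with h | h
  · simp [h]
  · simp [h, Ne.symm h]

theorem pvGetD_map_range {β : Type} (m : Nat) (f : Nat → β) (i : Int) (d : β)
    (h0 : 0 ≤ i) (h1 : i < (m : Int)) :
    PySem.List.pyGetD ((List.range m).map f) i d = f i.toNat := by
  rw [PySem.List.pyGetD_eq_getElem _ d h0 (by simpa using h1)]
  simp

theorem pvInsertBy_pass {α : Type} (before : α → α → Bool) (x : α) (L M : List α)
    (h : ∀ y ∈ L, before x y = false) :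
    PySem.List.insertBy before x (L ++ M) = L ++ PySem.List.insertBy before x M := by
  induction L with
  | nil => simp
  | cons a L ih =>
    simp only [List.cons_append, PySem.List.insertBy, h a (by simp)]
    simpa using ih (fun y hy => h y (by simp [hy]))
theorem pvInsertBy_head {α : Type} (before : α → α → Bool) (x : α) (M : List α)
    (h : ∀ y ∈ M, before x y = true) :
    PySem.List.insertBy before x M = x :: M := by
  cases M with
  | nil => simp [PySem.List.insertBy]
  | cons a M => simp [PySem.List.insertBy, h a (by simp)]
theorem pvFlatMap_congr {α β : Type} (ks : List α) (f g : α → List β)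
    (h : ∀ v ∈ ks, f v = g v) : ks.flatMap f = ks.flatMap g := by
  induction ks with
  | nil => rfl
  | cons a ks ih =>
    simp only [List.flatMap_cons, h a (by simp), ih (fun v hv => h v (by simp [hv]))]

theorem pvInsert_bucket {α κ : Type} [LinearOrder κ] (key : α → κ) (x : α) (ks : List κ)
    (T : List α) (hnd : ks.Pairwise (· < ·)) (hx : key x ∈ ks) :
    PySem.List.insertBy (fun a b => decide (key a < key b)) x
        (ks.flatMap fun v => T.filter (fun e => decide (key e = v)))
      = ks.flatMap (fun v => (T ++ [x]).filter (fun e => decide (key e = v))) := by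
  induction ks with
  | nil => simp at hx
  | cons v ks ih =>
    have hvks : ∀ u ∈ ks, v < u := (List.pairwise_cons.mp hnd).1
    have hndk : ks.Pairwise (· < ·) := (List.pairwise_cons.mp hnd).2
    simp only [List.flatMap_cons]
    rcases eq_or_ne (key x) v with hxv | hxv
    · -- x belongs to the first bucket: walk past it, then insert at the front of the rest
      rw [pvInsertBy_pass _ _ _ _ (by
        intro y hy
        have hkey : key y = v := by simpa using (List.mem_filter.mp hy).2
        simp [hkey, hxv])]
      rw [pvInsertBy_head _ _ _ (by
        intro y hy
        rcases List.mem_flatMap.mp hy with ⟨u, hu, hyu⟩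
        have hkey : key y = u := by simpa using (List.mem_filter.mp hyu).2
        simp [hkey, hxv, hvks u hu])]
      have h1 : (T ++ [x]).filter (fun e => decide (key e = v))
          = T.filter (fun e => decide (key e = v)) ++ [x] := by
        simp [List.filter_append, hxv]
      have h2 : ks.flatMap (fun u => (T ++ [x]).filter (fun e => decide (key e = u)))
          = ks.flatMap (fun u => T.filter (fun e => decide (key e = u))) := by
        apply pvFlatMap_congr
        intro u hu
        have hne : key x ≠ u := by rw [hxv]; exact ne_of_lt (hvks u hu)
        simp [List.filter_append, hne]
      rw [h1, h2]
      simp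
    · -- x belongs to a later bucket
      have hxks : key x ∈ ks := by
        rcases List.mem_cons.mp hx with h | h
        · exact absurd h hxv
        · exact h
      have hvx : v < key x := hvks _ hxks
      rw [pvInsertBy_pass _ _ _ _ (by
        intro y hy
        have hkey : key y = v := by simpa using (List.mem_filter.mp hy).2
        simp [hkey, not_lt]
        exact le_of_lt hvx)]
      rw [ih hndk hxks]
      have h1 : (T ++ [x]).filter (fun e => decide (key e = v))
          = T.filter (fun e => decide (key e = v)) := by
        simp [List.filter_append, hxv]
      rw [h1]

theorem pvSorted_buckets {α κ : Type} [LinearOrder κ] (key : α → κ) (T : List α) (ks : List κ)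
    (hnd : ks.Pairwise (· < ·)) (hcov : ∀ e ∈ T, key e ∈ ks) :
    T.foldl (fun acc x => PySem.List.insertBy (fun a b => decide (key a < key b)) x acc) []
      = ks.flatMap (fun v => T.filter (fun e => decide (key e = v))) := by
  induction T using List.reverseRecOn with
  | nil => simp
  | append_singleton T x ih =>
    rw [List.foldl_append]
    simp only [List.foldl_cons, List.foldl_nil]
    rw [ih (fun e he => hcov e (by simp [he]))]
    exact pvInsert_bucket key x ks T hnd (hcov x (by simp))

theorem pvPairwise_grid (A B : List Int) (hA : A.Pairwise (· < ·)) (hB : B.Pairwise (· < ·)) :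
    (A.flatMap fun a => B.map fun b => (toLex (a, b) : Lex (Int × Int))).Pairwise (· < ·) := by
  induction A with
  | nil => simp
  | cons a A ih =>
    have haA : ∀ u ∈ A, a < u := (List.pairwise_cons.mp hA).1
    simp only [List.flatMap_cons]
    rw [List.pairwise_append]
    refine ⟨?_, ih (List.pairwise_cons.mp hA).2, ?_⟩
    · exact hB.map _ (fun b b' hbb' => by
        simp [Prod.Lex.toLex_lt_toLex]; omega)
    · intro y hy z hz
      rcases List.mem_map.mp hy with ⟨b, hb, rfl⟩
      rcases List.mem_flatMap.mp hz with ⟨a', ha', hz'⟩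
      rcases List.mem_map.mp hz' with ⟨b', hb', rfl⟩
      simp [Prod.Lex.toLex_lt_toLex]
      have := haA a' ha'
      omega

theorem pvLexBefore_eq (a1 b1 a2 b2 : Int) :
    (decide (a1 < b1) || (!decide (b1 < a1) && decide (a2 < b2)))
      = decide ((toLex (a1, a2) : Lex (Int × Int)) < toLex (b1, b2)) := by
  rcases lt_trichotomy a1 b1 with h | h | h
  · simp [Prod.Lex.toLex_lt_toLex, h]
  · subst h; simp [Prod.Lex.toLex_lt_toLex]
  · simp [Prod.Lex.toLex_lt_toLex, not_lt.mpr (le_of_lt h), h, ne_of_gt h]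

theorem pvSorted2_eq_fold {α : Type} (T : List α) (k1 k2 : α → Int) :
    PySem.List.sorted2 T k1 k2
      = T.foldl (fun acc x => PySem.List.insertBy
          (fun a b => decide ((toLex (k1 a, k2 a) : Lex (Int × Int)) < toLex (k1 b, k2 b))) x acc) [] := by
  show T.foldl (fun acc x => PySem.List.insertBy _ x acc) [] = _
  congr 1
  funext acc x
  congr 1
  funext a b
  simp only [if_neg (by decide : ¬ (false = true))]
  exact pvLexBefore_eq (k1 a) (k1 b) (k2 a) (k2 b)

def pvKs (m : Nat) : List Int := (List.range m).map Int.ofNat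

theorem pvKs_pairwise (m : Nat) : (pvKs m).Pairwise (· < ·) := by
  unfold pvKs
  exact (List.pairwise_lt_range).map _ (by intro a b h; exact Int.ofNat_lt.mpr h)

theorem pvMem_pvKs (m : Nat) (x : Int) (h0 : 0 ≤ x) (h1 : x < (m : Int)) : x ∈ pvKs m := by
  unfold pvKs
  exact List.mem_map.mpr ⟨x.toNat, List.mem_range.mpr (by omega), by rw [Int.ofNat_eq_natCast]; omega⟩

def pvCnt (kol : Int) (P : List (String × Int × Int)) (v : Nat) : Nat :=
  P.countP (fun e => decide (pvGetCol e kol = (v : Int)))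

theorem pvCnt_append (kol : Int) (P Q : List (String × Int × Int)) (v : Nat) :
    pvCnt kol (P ++ Q) v = pvCnt kol P v + pvCnt kol Q v := by
  simp [pvCnt, List.countP_append]

theorem pvCnt_singleton (kol : Int) (e : String × Int × Int) (v : Nat) :
    pvCnt kol [e] v = if pvGetCol e kol = (v : Int) then 1 else 0 := by
  simp [pvCnt, List.countP_cons]

-- L1: the counting loop computes the histogram
theorem pvCountLoop (kol : Int) (k' : Nat) (T : List (String × Int × Int))
    (hb : ∀ e ∈ T, 0 ≤ pvGetCol e kol ∧ pvGetCol e kol < (k' : Int)) :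
    T.foldl (fun C element =>
        PySem.List.pySetD C (pvGetCol element kol) (PySem.List.pyGetD C (pvGetCol element kol) 0 + 1))
        (List.replicate k' (0 : Int))
      = (List.range k').map (fun v => (pvCnt kol T v : Int)) := by
  induction T using List.reverseRecOn with
  | nil =>
    apply List.ext_getElem (by simp)
    intro i h1 h2
    simp [pvCnt]
  | append_singleton T e ih =>
    have hbT : ∀ x ∈ T, 0 ≤ pvGetCol x kol ∧ pvGetCol x kol < (k' : Int) :=
      fun x hx => hb x (by simp [hx])
    have hbe := hb e (by simp)
    rw [List.foldl_append, List.foldl_cons, List.foldl_nil, ih hbT]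
    rw [pvGetD_map_range k' _ _ 0 hbe.1 hbe.2]
    rw [PySem.List.pySetD_of_nonneg _ _ hbe.1]
    rw [pvSet_map_range]
    apply List.map_congr_left
    intro v hv
    have hv' : v < k' := List.mem_range.mp hv
    rw [pvCnt_append, pvCnt_singleton]
    by_cases hc : pvGetCol e kol = (v : Int)
    · have hveq : v = (pvGetCol e kol).toNat := by omega
      rw [if_pos hveq, if_pos hc]
      rw [← hveq]
      push_cast
      ring
    · have hvne : v ≠ (pvGetCol e kol).toNat := by omega
      rw [if_neg hvne, if_neg hc]
      push_cast
      ring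

def pvPre (kol : Int) (T : List (String × Int × Int)) (v : Nat) : Nat :=
  ((List.range v).map (pvCnt kol T)).sum

theorem pvPre_succ (kol : Int) (T : List (String × Int × Int)) (v : Nat) :
    pvPre kol T (v + 1) = pvPre kol T v + pvCnt kol T v := by
  simp [pvPre, List.range_succ]

-- L2: the prefix-sum loop
theorem pvPrefLoop (kol : Int) (k' : Nat) (T : List (String × Int × Int)) (j : Nat) (hj : j ≤ k') :
    (PySem.List.pyRange 1 (j : Int) 1).foldl
        (fun C i => PySem.List.pySetD C i (PySem.List.pyGetD C i 0 + PySem.List.pyGetD C (i-1) 0))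
        ((List.range k').map (fun v => (pvCnt kol T v : Int)))
      = (List.range k').map (fun v =>
          if v < j then (pvPre kol T v : Int) + (pvCnt kol T v : Int) else (pvCnt kol T v : Int)) := by
  induction j with
  | zero =>
    rw [PySem.List.pyRange_one_eq_nil (by omega)]
    simp
  | succ j ihj =>
    have hjk : j ≤ k' := by omega
    rcases Nat.eq_zero_or_pos j with hj0 | hjpos
    · subst hj0
      rw [show ((0 + 1 : Nat) : Int) = 1 by norm_num]
      rw [PySem.List.pyRange_one_eq_nil (by omega)]
      simp only [List.foldl_nil]
      apply List.map_congr_left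
      intro v hv
      rcases Nat.eq_zero_or_pos v with rfl | hvpos
      · simp [pvPre]
      · rw [if_neg (by omega)]
    · rw [show ((j + 1 : Nat) : Int) = (j : Int) + 1 by push_cast; ring]
      rw [PySem.List.pyRange_one_succ_right (by exact_mod_cast Nat.one_le_iff_ne_zero.mpr (by omega))]
      rw [List.foldl_append, ihj hjk, List.foldl_cons, List.foldl_nil]
      rw [pvGetD_map_range k' _ _ 0 (by omega) (by exact_mod_cast (by omega : j < k'))]
      rw [show (j : Int) - 1 = ((j - 1 : Nat) : Int) by omega]
      rw [pvGetD_map_range k' _ _ 0 (by omega) (by exact_mod_cast (by omega : j - 1 < k'))]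
      rw [PySem.List.pySetD_of_nonneg _ _ (by omega : (0:Int) ≤ (j : Int))]
      rw [show ((j : Int)).toNat = j by omega]
      rw [pvSet_map_range]
      apply List.map_congr_left
      intro v hv
      have hv' : v < k' := List.mem_range.mp hv
      simp only [Int.toNat_natCast]
      rcases eq_or_ne v j with rfl | hne
      · have hpj : pvPre kol T v = pvPre kol T (v - 1) + pvCnt kol T (v - 1) := by
          have hv1 : v = (v - 1) + 1 := by omega
          rw [hv1, pvPre_succ]; rw [← hv1]
        split_ifs <;> omega
      · split_ifs <;> omega

-- range splitting helpers
theorem pvRange_split (w m : Nat) (h : w ≤ m) :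
    List.range m = List.range w ++ List.range' w (m - w) := by
  rw [List.range_eq_range']
  rw [show m = w + (m - w) by omega]
  rw [← List.range'_append (s := 0) (m := w) (n := m - w) (step := 1)]
  simp [List.range_eq_range']

theorem pvRange'_cons (w m : Nat) (h : w < m) :
    List.range' w (m - w) = w :: List.range' (w+1) (m - w - 1) := by
  rw [show m - w = (m - w - 1) + 1 by omega, List.range'_succ]
  simp

-- sum lemmas
theorem pvSum_indicator (m w : Nat) (hw : w < m) :
    ((List.range m).map (fun v => if v = w then (1:Nat) else 0)).sum = 1 := by
  induction m with
  | zero => omega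
  | succ m ih =>
    rw [List.range_succ, List.map_append, List.sum_append]
    rcases eq_or_ne w m with rfl | hne
    · have h0 : ((List.range w).map (fun v => if v = w then (1:Nat) else 0)) =
          (List.range w).map (fun _ => (0:Nat)) := by
        apply List.map_congr_left
        intro v hv
        have := List.mem_range.mp hv
        simp; omega
      simp [h0]
    · rw [ih (by omega)]
      simp [Ne.symm hne]

theorem pvCnt_total (kol : Int) (k' : Nat) (T : List (String × Int × Int))
    (hb : ∀ e ∈ T, 0 ≤ pvGetCol e kol ∧ pvGetCol e kol < (k' : Int)) :
    ((List.range k').map (fun v => pvCnt kol T v)).sum = T.length := by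
  induction T with
  | nil => simp [pvCnt]
  | cons e T ih =>
    have hbe := hb e (by simp)
    have hbT : ∀ x ∈ T, 0 ≤ pvGetCol x kol ∧ pvGetCol x kol < (k' : Int) :=
      fun x hx => hb x (by simp [hx])
    have hstep : ((List.range k').map (fun v => pvCnt kol (e :: T) v))
        = (List.range k').map (fun v => pvCnt kol T v + (if v = (pvGetCol e kol).toNat then 1 else 0)) := by
      apply List.map_congr_left
      intro v hv
      have hv' := List.mem_range.mp hv
      simp only [pvCnt, List.countP_cons]
      congr 1
      by_cases hc : pvGetCol e kol = (v : Int)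
      · rw [if_pos (by simpa using hc), if_pos (by omega)]
      · rw [if_neg (by simpa using hc), if_neg (by omega)]
    rw [hstep, List.sum_map_add, ih hbT, pvSum_indicator k' _ (by omega)]
    simp

theorem pvFlatMap_replicate {β : Type} (d : β) (ks : List Nat) (m : Nat → Nat) :
    ks.flatMap (fun v => List.replicate (m v) d) = List.replicate ((ks.map m).sum) d := by
  induction ks with
  | nil => simp
  | cons a ks ih =>
    simp only [List.flatMap_cons, ih, List.map_cons, List.sum_cons, ← List.replicate_add]

-- the layout of the output array B during the placement loop: P still to place, S placed
def pvBkt (kol : Int) (d : String × Int × Int) (P S : List (String × Int × Int)) (v : Nat) :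
    List (String × Int × Int) :=
  List.replicate (pvCnt kol P v) d ++ S.filter (fun e => decide (pvGetCol e kol = (v : Int)))

def pvLayout (kol : Int) (d : String × Int × Int) (k' : Nat) (P S : List (String × Int × Int)) :
    List (String × Int × Int) :=
  (List.range k').flatMap (pvBkt kol d P S)

def pvCmap (kol : Int) (T P : List (String × Int × Int)) (k' : Nat) : List Int :=
  (List.range k').map (fun v => (pvPre kol T v : Int) + (pvCnt kol P v : Int))

theorem pvBkt_len (kol : Int) (d : String × Int × Int) (P S : List (String × Int × Int)) (v : Nat) :
    (pvBkt kol d P S v).length = pvCnt kol P v + pvCnt kol S v := by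
  simp [pvBkt, pvCnt, List.countP_eq_length_filter]

theorem pvLayout_prefix_len (kol : Int) (d : String × Int × Int)
    (T P S : List (String × Int × Int)) (w : Nat)
    (hsplit : ∀ v, pvCnt kol P v + pvCnt kol S v = pvCnt kol T v) :
    ((List.range w).flatMap (pvBkt kol d P S)).length = pvPre kol T w := by
  rw [List.length_flatMap, pvPre]
  congr 1
  apply List.map_congr_left
  intro v _
  rw [pvBkt_len, hsplit]

-- L5: one placement step
theorem pvPlaceStep (kol : Int) (d : String × Int × Int) (k' : Nat)
    (T P S : List (String × Int × Int)) (e : String × Int × Int)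
    (hT : T = (P ++ [e]) ++ S)
    (hbe : 0 ≤ pvGetCol e kol ∧ pvGetCol e kol < (k' : Int)) :
    (PySem.List.pySetD (pvLayout kol d k' (P ++ [e]) S)
        (PySem.List.pyGetD (pvCmap kol T (P ++ [e]) k') (pvGetCol e kol) 0 - 1) e,
     PySem.List.pySetD (pvCmap kol T (P ++ [e]) k') (pvGetCol e kol)
        (PySem.List.pyGetD (pvCmap kol T (P ++ [e]) k') (pvGetCol e kol) 0 - 1))
      = (pvLayout kol d k' P (e :: S), pvCmap kol T P k') := by
  have hw : (pvGetCol e kol).toNat < k' := by omega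
  have hkey : pvGetCol e kol = ((pvGetCol e kol).toNat : Int) := by omega
  set w := (pvGetCol e kol).toNat with hwdef
  have hcntPe : pvCnt kol (P ++ [e]) w = pvCnt kol P w + 1 := by
    rw [pvCnt_append, pvCnt_singleton, if_pos (by omega)]
  have hcntPe' : ∀ v : Nat, v ≠ w → pvCnt kol (P ++ [e]) v = pvCnt kol P v := by
    intro v hv
    rw [pvCnt_append, pvCnt_singleton, if_neg (by omega)]
    omega
  have hread : PySem.List.pyGetD (pvCmap kol T (P ++ [e]) k') (pvGetCol e kol) 0
      = (pvPre kol T w : Int) + (pvCnt kol P w : Int) + 1 := by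
    rw [pvCmap, pvGetD_map_range k' _ _ 0 hbe.1 hbe.2, ← hwdef, hcntPe]
    push_cast
    ring
  have hfilter_cons_w : (e :: S).filter (fun x => decide (pvGetCol x kol = (w : Int)))
      = e :: S.filter (fun x => decide (pvGetCol x kol = (w : Int))) := by
    rw [List.filter_cons_of_pos (by simpa using hkey)]
  have hfilter_cons_ne : ∀ v : Nat, v ≠ w →
      (e :: S).filter (fun x => decide (pvGetCol x kol = (v : Int)))
        = S.filter (fun x => decide (pvGetCol x kol = (v : Int))) := by
    intro v hv
    rw [List.filter_cons_of_neg (by simp; omega)]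
  have hbkt_ne : ∀ v : Nat, v ≠ w → pvBkt kol d (P ++ [e]) S v = pvBkt kol d P (e :: S) v := by
    intro v hv
    rw [pvBkt, pvBkt, hcntPe' v hv, hfilter_cons_ne v hv]
  refine Prod.ext ?_ ?_
  · -- the B array
    show PySem.List.pySetD (pvLayout kol d k' (P ++ [e]) S)
        (PySem.List.pyGetD (pvCmap kol T (P ++ [e]) k') (pvGetCol e kol) 0 - 1) e
      = pvLayout kol d k' P (e :: S)
    rw [hread]
    rw [show (pvPre kol T w : Int) + (pvCnt kol P w : Int) + 1 - 1
        = ((pvPre kol T w + pvCnt kol P w : Nat) : Int) by push_cast; ring]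
    rw [PySem.List.pySetD_of_nonneg _ _ (by positivity)]
    rw [Int.toNat_natCast]
    rw [pvLayout, pvLayout]
    rw [pvRange_split w k' (le_of_lt hw), pvRange'_cons w k' hw]
    rw [List.flatMap_append, List.flatMap_cons]
    have hlen : ((List.range w).flatMap (pvBkt kol d (P ++ [e]) S)).length = pvPre kol T w := by
      apply pvLayout_prefix_len
      intro v
      simp only [hT, pvCnt_append]
    rw [List.set_append, hlen, if_neg (by omega)]
    rw [show pvPre kol T w + pvCnt kol P w - pvPre kol T w = pvCnt kol P w by omega]
    rw [List.set_append, if_pos (by rw [pvBkt_len, hcntPe]; omega)]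
    have hsetbkt : (pvBkt kol d (P ++ [e]) S w).set (pvCnt kol P w) e = pvBkt kol d P (e :: S) w := by
      rw [pvBkt, hcntPe, List.replicate_succ', List.append_assoc, List.set_append,
          if_neg (by simp), List.length_replicate, Nat.sub_self, List.singleton_append,
          List.set_cons_zero]
      rw [pvBkt, hfilter_cons_w]
    rw [hsetbkt]
    rw [List.flatMap_append, List.flatMap_cons]
    congr 1
    · apply pvFlatMap_congr
      intro v hv
      have hvw := List.mem_range.mp hv
      exact hbkt_ne v (by omega)
    · congr 1
      apply pvFlatMap_congr
      intro v hv
      have hvw := List.mem_range'_1.mp hv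
      exact hbkt_ne v (by omega)
  · -- the C array
    show PySem.List.pySetD (pvCmap kol T (P ++ [e]) k') (pvGetCol e kol)
        (PySem.List.pyGetD (pvCmap kol T (P ++ [e]) k') (pvGetCol e kol) 0 - 1)
      = pvCmap kol T P k'
    rw [hread]
    rw [PySem.List.pySetD_of_nonneg _ _ hbe.1]
    rw [pvCmap, pvCmap, ← hwdef, pvSet_map_range]
    apply List.map_congr_left
    intro v hv
    rcases eq_or_ne v w with rfl | hne
    · rw [if_pos rfl]
      ring
    · rw [if_neg hne, hcntPe' v hne]

-- L6: the whole placement loop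
theorem pvPlaceLoop (kol : Int) (d : String × Int × Int) (k' : Nat)
    (T : List (String × Int × Int))
    (hb : ∀ e ∈ T, 0 ≤ pvGetCol e kol ∧ pvGetCol e kol < (k' : Int)) :
    ∀ (P S : List (String × Int × Int)), T = P ++ S →
    P.reverse.foldl (fun BC t =>
        (PySem.List.pySetD BC.1 (PySem.List.pyGetD BC.2 (pvGetCol t kol) 0 - 1) t,
         PySem.List.pySetD BC.2 (pvGetCol t kol) (PySem.List.pyGetD BC.2 (pvGetCol t kol) 0 - 1)))
        (pvLayout kol d k' P S, pvCmap kol T P k')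
      = (pvLayout kol d k' [] T, pvCmap kol T [] k') := by
  intro P
  induction P using List.reverseRecOn with
  | nil =>
    intro S hTS
    simp [hTS]
  | append_singleton P e ih =>
    intro S hTS
    rw [List.reverse_append, List.reverse_singleton, List.singleton_append, List.foldl_cons]
    have hbe : 0 ≤ pvGetCol e kol ∧ pvGetCol e kol < (k' : Int) :=
      hb e (by rw [hTS]; simp)
    rw [pvPlaceStep kol d k' T P S e hTS hbe]
    exact ih (e :: S) (by rw [hTS]; simp)

theorem pvCountingSort_eq_buckets (T : List (String × Int × Int)) (k kol : Int) (hk : 0 < k)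
    (hb : ∀ e ∈ T, 0 ≤ pvGetCol e kol ∧ pvGetCol e kol < k) :
    pvCountingSort T k kol
      = (pvKs k.toNat).flatMap (fun v => T.filter (fun e => decide (pvGetCol e kol = v))) := by
  have hkk : ((k.toNat : Nat) : Int) = k := by omega
  have hb' : ∀ e ∈ T, 0 ≤ pvGetCol e kol ∧ pvGetCol e kol < ((k.toNat : Nat) : Int) := by
    intro e he
    have := hb e he
    omega
  simp only [pvCountingSort]
  rw [pvCountLoop kol k.toNat T hb']
  rw [show PySem.List.pyRange 1 k 1 = PySem.List.pyRange 1 ((k.toNat : Nat) : Int) 1 by rw [hkk]]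
  rw [pvPrefLoop kol k.toNat T k.toNat le_rfl]
  have hC2 : (List.range k.toNat).map (fun v =>
        if v < k.toNat then (pvPre kol T v : Int) + (pvCnt kol T v : Int) else (pvCnt kol T v : Int))
      = pvCmap kol T T k.toNat := by
    rw [pvCmap]
    apply List.map_congr_left
    intro v hv
    rw [if_pos (List.mem_range.mp hv)]
  rw [hC2]
  have hB0 : List.replicate (PySem.List.len T).toNat ("", (0:Int), (0:Int))
      = pvLayout kol ("", (0, 0)) k.toNat T [] := by
    rw [pvLayout]
    have : ∀ v ∈ List.range k.toNat, pvBkt kol ("", (0, 0)) T [] v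
        = List.replicate (pvCnt kol T v) ("", (0, 0)) := by
      intro v _
      simp [pvBkt]
    rw [pvFlatMap_congr _ _ _ this, pvFlatMap_replicate, pvCnt_total kol k.toNat T hb']
    simp [PySem.List.len_eq]
  rw [hB0]
  have hconv : ∀ init : List (String × Int × Int) × List Int,
      (PySem.List.pyRange (PySem.List.len T - 1) (-1) (-1)).foldl
        (fun BC i =>
          (PySem.List.pySetD BC.1
              (PySem.List.pyGetD BC.2 (pvGetCol (PySem.List.pyGetD T i ("", 0, 0)) kol) 0 - 1)
              (PySem.List.pyGetD T i ("", 0, 0)),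
           PySem.List.pySetD BC.2 (pvGetCol (PySem.List.pyGetD T i ("", 0, 0)) kol)
              (PySem.List.pyGetD BC.2 (pvGetCol (PySem.List.pyGetD T i ("", 0, 0)) kol) 0 - 1))) init
        = T.reverse.foldl (fun BC t =>
            (PySem.List.pySetD BC.1 (PySem.List.pyGetD BC.2 (pvGetCol t kol) 0 - 1) t,
             PySem.List.pySetD BC.2 (pvGetCol t kol) (PySem.List.pyGetD BC.2 (pvGetCol t kol) 0 - 1))) init := by
    intro init
    rw [PySem.List.pyRange_neg_one_eq_reverse]
    rw [show (-1 : Int) + 1 = 0 by norm_num]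
    rw [show PySem.List.len T - 1 + 1 = PySem.List.len T by ring]
    conv_rhs => rw [← PySem.List.map_pyGetD_pyRange_zero T ("", 0, 0)]
    rw [← List.map_reverse, List.foldl_map]
  rw [hconv]
  rw [pvPlaceLoop kol ("", 0, 0) k.toNat T hb' T [] (by simp)]
  have hlenLayout : (pvLayout kol ("", (0:Int), (0:Int)) k.toNat [] T).length = T.length := by
    rw [pvLayout, List.length_flatMap]
    rw [← pvCnt_total kol k.toNat T hb']
    congr 1
    apply List.map_congr_left
    intro v _
    rw [pvBkt_len]
    simp [pvCnt]
  have hlenT : PySem.List.len T = PySem.List.len (pvLayout kol ("", (0:Int), (0:Int)) k.toNat [] T) := by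
    rw [PySem.List.len_eq, PySem.List.len_eq, hlenLayout]
  rw [hlenT]
  rw [PySem.List.map_pyGetD_pyRange_zero]
  rw [pvLayout, pvKs, List.flatMap_map]
  apply pvFlatMap_congr
  intro v _
  rw [pvBkt]
  simp [pvCnt, Int.ofNat_eq_natCast]

theorem pvTwoPass_eq_sorted2 (T : List (String × Int × Int)) (k : Int) (hk : 0 < k)
    (hb1 : ∀ e ∈ T, 0 ≤ e.2.1 ∧ e.2.1 < k) (hb2 : ∀ e ∈ T, 0 ≤ e.2.2 ∧ e.2.2 < k) :
    pvCountingSort (pvCountingSort T k 2) k 1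
      = PySem.List.sorted2 T (fun t => t.2.1) (fun t => t.2.2) := by
  have hcol2 : ∀ e : String × Int × Int, pvGetCol e 2 = e.2.2 := by
    intro e; simp [pvGetCol]
  have hcol1 : ∀ e : String × Int × Int, pvGetCol e 1 = e.2.1 := by
    intro e; simp [pvGetCol]
  have h2 : pvCountingSort T k 2
      = (pvKs k.toNat).flatMap (fun b => T.filter (fun e => decide (e.2.2 = b))) := by
    rw [pvCountingSort_eq_buckets T k 2 hk (by intro e he; rw [hcol2]; exact hb2 e he)]
    simp only [hcol2]
  have hmem : ∀ e ∈ pvCountingSort T k 2, e ∈ T := by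
    intro e he
    rw [h2] at he
    rcases List.mem_flatMap.mp he with ⟨v, _, hev⟩
    exact (List.mem_filter.mp hev).1
  have h1 : pvCountingSort (pvCountingSort T k 2) k 1
      = (pvKs k.toNat).flatMap
          (fun a => (pvCountingSort T k 2).filter (fun e => decide (e.2.1 = a))) := by
    rw [pvCountingSort_eq_buckets _ k 1 hk (by intro e he; rw [hcol1]; exact hb1 e (hmem e he))]
    simp only [hcol1]
  have grid_pw : ((pvKs k.toNat).flatMap
      (fun a => (pvKs k.toNat).map (fun b => (toLex (a, b) : Lex (Int × Int))))).Pairwise (· < ·) :=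
    pvPairwise_grid _ _ (pvKs_pairwise _) (pvKs_pairwise _)
  have hcov : ∀ e ∈ T, (toLex (e.2.1, e.2.2) : Lex (Int × Int)) ∈
      (pvKs k.toNat).flatMap
        (fun a => (pvKs k.toNat).map (fun b => (toLex (a, b) : Lex (Int × Int)))) := by
    intro e he
    apply List.mem_flatMap.mpr
    refine ⟨e.2.1, pvMem_pvKs _ _ (hb1 e he).1 (by have := (hb1 e he).2; omega), ?_⟩
    exact List.mem_map.mpr ⟨e.2.2, pvMem_pvKs _ _ (hb2 e he).1 (by have := (hb2 e he).2; omega), rfl⟩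
  have hB : PySem.List.sorted2 T (fun t => t.2.1) (fun t => t.2.2)
      = ((pvKs k.toNat).flatMap
          (fun a => (pvKs k.toNat).map (fun b => (toLex (a, b) : Lex (Int × Int))))).flatMap
          (fun v => T.filter (fun e => decide ((toLex (e.2.1, e.2.2) : Lex (Int × Int)) = v))) := by
    rw [pvSorted2_eq_fold]
    exact pvSorted_buckets (fun t => (toLex (t.2.1, t.2.2) : Lex (Int × Int))) T _ grid_pw hcov
  rw [h1, h2, hB]
  rw [List.flatMap_assoc]
  apply pvFlatMap_congr
  intro a _
  rw [List.flatMap_map, List.filter_flatMap]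
  apply pvFlatMap_congr
  intro b _
  rw [List.filter_filter]
  apply List.filter_congr
  intro e _
  simp only [toLex_inj, Prod.mk.injEq]
  rcases Decidable.em (e.2.1 = a) with h | h <;> rcases Decidable.em (e.2.2 = b) with h' | h' <;>
    simp [h, h']

theorem pvCountLetter_eq (x : String) : pvCountLetter x = pvLetters x := by
  rw [pvCountLetter, pvLetters, PySem.List.foldl_ite_add_one]
  rw [show (0:Int) + ((x.toList.countP (fun s => decide (97 ≤ (s.toNat : Int) ∧ (s.toNat : Int) ≤ 122)) : Nat) : Int)
      = ((x.toList.countP (fun s => decide (97 ≤ (s.toNat : Int) ∧ (s.toNat : Int) ≤ 122)) : Nat) : Int) by ring]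
  congr 1
  apply List.countP_congr
  intro c _
  simp only [decide_eq_true_eq]
  rw [Char.le_def, Char.le_def]
  rw [UInt32.le_iff_toNat_le, UInt32.le_iff_toNat_le]
  have hca : (('a' : Char)).val.toNat = 97 := by decide
  have hcz : (('z' : Char)).val.toNat = 122 := by decide
  have hc : c.toNat = c.val.toNat := rfl
  rw [hca, hcz, ← hc]
  omega

theorem google_eq : ∀ (H : List String) (s : Int), google H s = google_alt H s := by
  intro H s
  simp only [google, google_alt]
  have hmax : ∀ x ∈ H, PySem.Str.len x ≤ PySem.Str.len (PySem.List.maxD H (fun y => PySem.Str.len y) "") := by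
    intro x hx
    rcases hM : PySem.List.max? H (fun y => PySem.Str.len y) with _ | m
    · have hnil : H = [] := (PySem.List.max?_eq_none_iff _ _).mp hM
      rw [hnil] at hx
      cases hx
    · have hle := PySem.List.max?_isMax hM x hx
      have hMD : PySem.List.maxD H (fun y => PySem.Str.len y) "" = m := by
        rw [PySem.List.maxD, hM, Option.getD_some]
      rw [hMD]
      exact hle
  set k : Int := PySem.Str.len (PySem.List.maxD H (fun y => PySem.Str.len y) "") + 1 with hkdef
  have hk : 0 < k := by
    have : (0:Int) ≤ PySem.Str.len (PySem.List.maxD H (fun y => PySem.Str.len y) "") := by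
      rw [PySem.Str.len_eq]; positivity
    omega
  have hH1 : (PySem.List.pyRange 0 (PySem.List.len H) 1).map (fun i =>
        let x := PySem.List.pyGetD H i ""
        (x, PySem.Str.len x, pvCountLetter x))
      = H.map (fun x => (x, PySem.Str.len x, pvLetters x)) := by
    conv_rhs => rw [← PySem.List.map_pyGetD_pyRange_zero H ""]
    rw [List.map_map]
    apply List.map_congr_left
    intro i _
    simp [Function.comp, pvCountLetter_eq]
  rw [hH1]
  have hb1 : ∀ e ∈ H.map (fun x => (x, PySem.Str.len x, pvLetters x)), 0 ≤ e.2.1 ∧ e.2.1 < k := by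
    intro e he
    rcases List.mem_map.mp he with ⟨x, hx, rfl⟩
    have h1 := hmax x hx
    have h2 : (0:Int) ≤ PySem.Str.len x := by rw [PySem.Str.len_eq]; positivity
    dsimp only
    omega
  have hb2 : ∀ e ∈ H.map (fun x => (x, PySem.Str.len x, pvLetters x)), 0 ≤ e.2.2 ∧ e.2.2 < k := by
    intro e he
    rcases List.mem_map.mp he with ⟨x, hx, rfl⟩
    have h1 := hmax x hx
    have h2 : pvLetters x ≤ PySem.Str.len x := by
      rw [pvLetters, PySem.Str.len_eq]
      exact_mod_cast List.countP_le_length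
    have h3 : (0:Int) ≤ pvLetters x := by rw [pvLetters]; positivity
    dsimp only
    omega
  rw [pvTwoPass_eq_sorted2 _ k hk hb1 hb2]

-- ===== VERDICT (by name: the statement is the Claim_ definition above) =====
theorem google_spec : Claim_equal_google := by
  intro H s _ _
  unfold Spec_google
  exact google_eq H s
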